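-- pv_equiv track=rewrite | github.com/vijayant-pandey-primotech/test | Rejara-AI-v2-dev/src/core/utils.py | is_key_value_format
-- ===== SOURCE A (Python) =====
-- def is_key_value_format(text: str) -> bool:
--     # Check if text is in key=value format (e.g., "bob=xxx, john=xxx, mary=xxx")
--     if not isinstance(text, str):
--         return False
--     # Check if it contains "=" and looks like key=value pairs
--     if "=" not in text:
--         return False
--     # Split by comma and check for key-value pairs
--     # Allow text between pairs (not every part needs "=")
--     parts = [part.strip() for part in text.split(",") if part.strip()]
--     # Count how many parts have valid key=value format
--     key_value_parts = [part for part in parts if "=" in part and len(part.split("=", 1)) == 2]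
--     # Return True if we have at least 1 key-value pair (e.g., "joey=not yet")
--     return len(key_value_parts) >= 1
-- ===== SOURCE B (Python) =====
-- def is_key_value_format(text: str) -> bool:
--     # One containment check: any '=' always survives A's split/strip/count pipeline.
--     return isinstance(text, str) and "=" in text
-- ===== Notes on version B (the rewrite author's own statement) =====
-- stated objective: simpler
-- what changed: Replaced A's split-by-comma / strip / count-key-value-parts pipeline with a single substring-containment check, equivalent because any occurrence of the separator character always survives stripping and yields a valid two-piece part.
import Mathlib
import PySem

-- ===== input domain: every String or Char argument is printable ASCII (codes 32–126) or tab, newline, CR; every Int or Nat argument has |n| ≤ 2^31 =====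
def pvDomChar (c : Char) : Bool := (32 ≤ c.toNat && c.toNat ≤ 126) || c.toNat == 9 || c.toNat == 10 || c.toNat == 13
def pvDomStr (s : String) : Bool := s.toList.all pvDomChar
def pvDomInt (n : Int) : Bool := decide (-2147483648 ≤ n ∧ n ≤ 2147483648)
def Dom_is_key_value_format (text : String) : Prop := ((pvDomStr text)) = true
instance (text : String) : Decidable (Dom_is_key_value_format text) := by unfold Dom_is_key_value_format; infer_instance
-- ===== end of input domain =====

-- B replaces A's split/strip/count pipeline by a single '=' containment check (equivalent; simpler).

-- ===== PORT A =====
def is_key_value_format (text : String) : Bool :=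
  -- 'isinstance(text, str)' is true for every String argument
  if !(PySem.Str.isIn "=" text) then false
  else
    -- parts = [part.strip() for part in text.split(",") if part.strip()]
    let parts : List (List Char) :=
      ((PySem.Chars.splitOn text.toList [',']).map PySem.Chars.strip).filter (fun p => !p.isEmpty)
    -- key_value_parts = [part for part in parts if "=" in part and len(part.split("=", 1)) == 2]
    let kv : List (List Char) :=
      parts.filter (fun p => PySem.Chars.isIn ['='] p && ((PySem.Chars.splitOnMax p ['='] 1).length == 2))
    decide (1 ≤ kv.length)

-- ===== PORT B =====
def is_key_value_format_alt (text : String) : Bool :=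
  PySem.Str.isIn "=" text

-- ===== PRECONDITION & SPEC =====
def Spec_is_key_value_format (text : String) (out : Bool) : Prop := out = is_key_value_format_alt text
instance (text : String) (out : Bool) : Decidable (Spec_is_key_value_format text out) := by unfold Spec_is_key_value_format; infer_instance

-- ===== CLAIM (what is proved, stated in full; the proofs are below) =====
def Claim_equal_is_key_value_format : Prop := ∀ (text : String), Dom_is_key_value_format text → Spec_is_key_value_format text (is_key_value_format text)

-- ===== LEMMAS AND PROOFS =====

-- splitOnMax.go with budget 0 splits left: the result is acc plus one final chunk.
theorem go_m_zero (sep : List Char) (fuel : Nat) (l cur : List Char) (acc : List (List Char)) :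
    (PySem.Chars.splitOnMax.go sep fuel 0 l cur acc).length = acc.length + 1 := by
  cases fuel with
  | zero => simp [PySem.Chars.splitOnMax.go]
  | succ f => cases l <;> simp [PySem.Chars.splitOnMax.go]

-- if '=' occurs in l, splitOnMax.go on sep ['='] with budget 1 adds exactly two chunks.
theorem go_m_one (fuel : Nat) (l cur : List Char) (acc : List (List Char))
    (hf : l.length < fuel) (h : '=' ∈ l) :
    (PySem.Chars.splitOnMax.go ['='] fuel 1 l cur acc).length = acc.length + 2 := by
  induction fuel generalizing l cur acc with
  | zero => omega
  | succ f ih =>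
    cases l with
    | nil => simp at h
    | cons c rest =>
      by_cases hc : c = '='
      · subst hc
        have heq : PySem.Chars.splitOnMax.go ['='] (f+1) 1 ('=' :: rest) cur acc =
            PySem.Chars.splitOnMax.go ['='] f 0 rest [] (cur.reverse :: acc) := by
          simp [PySem.Chars.splitOnMax.go, List.isPrefixOf]
        rw [heq, go_m_zero]
        simp
      · have hc' : ('=' = c) = False := eq_false (fun hh => hc (Eq.symm hh))
        have hr : '=' ∈ rest := by
          rcases List.mem_cons.mp h with h1 | h1
          · exact absurd h1.symm hc
          · exact h1
        have heq : PySem.Chars.splitOnMax.go ['='] (f+1) 1 (c :: rest) cur acc =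
            PySem.Chars.splitOnMax.go ['='] f 1 rest (c :: cur) acc := by
          simp [PySem.Chars.splitOnMax.go, List.isPrefixOf, hc']
        rw [heq]
        exact ih rest (c :: cur) acc (by simp at hf ⊢; omega) hr

-- every chunk already in acc survives into the result of splitOn.go.
theorem go_acc_mem (sep : List Char) (fuel : Nat) (l cur : List Char) (acc : List (List Char))
    (q : List Char) (hq : q ∈ acc) :
    q ∈ PySem.Chars.splitOn.go sep fuel l cur acc := by
  induction fuel generalizing l cur acc with
  | zero => simp [PySem.Chars.splitOn.go]; tauto
  | succ f ih =>
    cases l with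
    | nil => simp [PySem.Chars.splitOn.go]; tauto
    | cons c rest =>
      simp only [PySem.Chars.splitOn.go]
      split
      · exact ih _ _ _ (by simp [hq])
      · exact ih _ _ _ hq

-- a character that is not the (single-char) separator ends up in some chunk of splitOn.go.
theorem go_mem_chunk (fuel : Nat) (l cur : List Char) (acc : List (List Char))
    (hf : l.length < fuel) (h : '=' ∈ cur.reverse ++ l) :
    ∃ p ∈ PySem.Chars.splitOn.go [','] fuel l cur acc, '=' ∈ p := by
  induction fuel generalizing l cur acc with
  | zero => omega
  | succ f ih =>
    cases l with
    | nil =>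
      refine ⟨cur.reverse, ?_, by simpa using h⟩
      simp [PySem.Chars.splitOn.go]
    | cons c rest =>
      by_cases hc : c = ','
      · subst hc
        have heq : PySem.Chars.splitOn.go [','] (f+1) (',' :: rest) cur acc =
            PySem.Chars.splitOn.go [','] f rest [] (cur.reverse :: acc) := by
          simp [PySem.Chars.splitOn.go, List.isPrefixOf]
        rw [heq]
        rcases List.mem_append.mp h with h1 | h1
        · exact ⟨cur.reverse, go_acc_mem _ _ _ _ _ _ (by simp), h1⟩
        · have hr : '=' ∈ rest := by
            rcases List.mem_cons.mp h1 with h2 | h2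
            · exact absurd h2 (by decide)
            · exact h2
          exact ih rest [] (cur.reverse :: acc) (by simp at hf ⊢; omega) (by simpa using hr)
      · have hc' : (',' = c) = False := eq_false (fun hh => hc (Eq.symm hh))
        have heq : PySem.Chars.splitOn.go [','] (f+1) (c :: rest) cur acc =
            PySem.Chars.splitOn.go [','] f rest (c :: cur) acc := by
          simp [PySem.Chars.splitOn.go, List.isPrefixOf, hc']
        rw [heq]
        apply ih rest (c :: cur) acc (by simp at hf ⊢; omega)
        simp only [List.mem_append, List.mem_reverse, List.mem_cons] at h ⊢
        tauto

-- if '=' occurs in the text, some chunk of the comma split contains it.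
theorem splitOn_mem_chunk (cs : List Char) (h : '=' ∈ cs) :
    ∃ p ∈ PySem.Chars.splitOn cs [','], '=' ∈ p := by
  unfold PySem.Chars.splitOn
  exact go_mem_chunk (cs.length + 1) cs [] [] (by omega) (by simpa using h)

-- a non-whitespace character survives strip.
theorem mem_strip (p : List Char) (h : '=' ∈ p) : '=' ∈ PySem.Chars.strip p := by
  unfold PySem.Chars.strip PySem.Chars.rstrip PySem.Chars.lstrip
  have step : ∀ (l : List Char), '=' ∈ l → '=' ∈ l.dropWhile PySem.Chars.isspace := by
    intro l hl
    induction l with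
    | nil => simp at hl
    | cons a t iht =>
      by_cases ha : PySem.Chars.isspace a
      · rw [List.dropWhile_cons_of_pos ha]
        apply iht
        rcases List.mem_cons.mp hl with h1 | h1
        · exfalso; rw [← h1] at ha; exact absurd ha (by decide)
        · exact h1
      · rw [List.dropWhile_cons_of_neg ha]; exact hl
  have h1 : '=' ∈ List.dropWhile PySem.Chars.isspace p := step _ h
  have h2 : '=' ∈ List.dropWhile PySem.Chars.isspace
      (List.dropWhile PySem.Chars.isspace p).reverse := step _ (by simpa using h1)
  simpa using h2

-- if '=' occurs in p, p.split('=', 1) has exactly two pieces.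
theorem splitOnMax_len_two (p : List Char) (h : '=' ∈ p) :
    (PySem.Chars.splitOnMax p ['='] 1).length = 2 := by
  unfold PySem.Chars.splitOnMax
  rw [if_neg (by omega)]
  have := go_m_one (p.length + 1) p [] [] (by omega) h
  simpa using this

-- ===== VERDICT (by name: the statement is the Claim_ definition above) =====
theorem is_key_value_format_spec : Claim_equal_is_key_value_format := by
  intro text _
  unfold Spec_is_key_value_format is_key_value_format is_key_value_format_alt
  by_cases hin : PySem.Str.isIn "=" text = true
  · rw [hin]
    simp only [Bool.not_true, Bool.false_eq_true, if_false]
    have hmem : '=' ∈ text.toList := by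
      have := (PySem.Str.isIn_iff_infix _ _).mp hin
      exact (List.singleton_infix_iff '=' text.toList).mp (by simpa using this)
    obtain ⟨p, hp, hpe⟩ := splitOn_mem_chunk text.toList hmem
    have hse : '=' ∈ PySem.Chars.strip p := mem_strip p hpe
    have hne : (PySem.Chars.strip p).isEmpty = false := by
      cases hsp : PySem.Chars.strip p with
      | nil => rw [hsp] at hse; simp at hse
      | cons a t => simp
    -- strip p is in parts and passes the key=value filter
    have hparts : PySem.Chars.strip p ∈
        ((PySem.Chars.splitOn text.toList [',']).map PySem.Chars.strip).filter (fun q => !q.isEmpty) := by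
      apply List.mem_filter.mpr
      exact ⟨List.mem_map.mpr ⟨p, hp, rfl⟩, by simp [hne]⟩
    have hkv : PySem.Chars.strip p ∈
        (((PySem.Chars.splitOn text.toList [',']).map PySem.Chars.strip).filter (fun q => !q.isEmpty)).filter
          (fun q => PySem.Chars.isIn ['='] q && ((PySem.Chars.splitOnMax q ['='] 1).length == 2)) := by
      apply List.mem_filter.mpr
      refine ⟨hparts, ?_⟩
      have h1 : PySem.Chars.isIn ['='] (PySem.Chars.strip p) = true :=
        (PySem.Chars.isIn_iff_infix _ _).mpr ((List.singleton_infix_iff '=' _).mpr hse)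
      have h2 := splitOnMax_len_two _ hse
      simp [h1, h2]
    simp only [decide_eq_true_eq]
    exact List.length_pos_of_mem hkv
  · have hf : PySem.Str.isIn "=" text = false := by simpa using hin
    rw [hf]
    simp
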